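-- pv_equiv track=rewrite | github.com/SilenceX12138/BUAA-OO-auto-test-machine-for-elevator | ruler/capacity.py | capacity_check
-- ===== SOURCE A (Python) =====
-- def capacity_check(send_list=[]):
--     state_str = ""
--     for send in send_list:
--         sep_pos = send.index('-')
--         if (send[:sep_pos] == "OPEN"):
--             state_str += "1"
--         else:
--             state_str += "0"
--     try:
--         state_str.index("1111111")
--         return True
--     except ValueError:
--         return False
-- ===== SOURCE B (Python) =====
-- def capacity_check(send_list=[]):
--     found = False
--     run = 0
--     for send in send_list:
--         sep_pos = send.index('-')
--         if send[:sep_pos] == "OPEN":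
--             run += 1
--             if run >= 7:
--                 found = True
--         else:
--             run = 0
--     return found
-- ===== Notes on version B (the rewrite author's own statement) =====
-- stated objective: alternative
-- what changed: Replaces building an intermediate 0/1 string and substring-searching for '1111111' with a single pass maintaining a consecutive-OPEN run counter and a found flag (no early return, so later malformed elements still raise as in A).
import Mathlib
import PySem

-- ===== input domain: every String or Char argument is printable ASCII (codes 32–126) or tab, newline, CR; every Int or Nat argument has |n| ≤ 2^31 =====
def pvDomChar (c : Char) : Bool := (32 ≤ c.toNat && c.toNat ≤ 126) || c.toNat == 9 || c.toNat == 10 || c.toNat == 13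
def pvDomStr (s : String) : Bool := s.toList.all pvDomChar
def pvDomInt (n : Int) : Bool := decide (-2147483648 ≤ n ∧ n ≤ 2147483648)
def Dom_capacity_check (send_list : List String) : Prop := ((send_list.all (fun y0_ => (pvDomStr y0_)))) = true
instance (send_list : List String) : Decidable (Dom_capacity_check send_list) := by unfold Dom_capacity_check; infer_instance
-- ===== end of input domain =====

-- B replaces A's intermediate 0/1 string + substring search for "1111111" by a single pass
-- keeping a consecutive-OPEN run counter and a found flag (alternative decomposition, same cost).


-- ===== PORT A =====
-- state_str accumulated as a List Char; send.index('-') is Chars.find (Pre_ keeps it ≥ 0);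
-- the try/except around state_str.index("1111111") becomes the if on find = -1.
def capacity_check (send_list : List String) : Bool :=
  let state_str : List Char := send_list.foldl (fun acc send =>
    let sep_pos := PySem.Chars.find send.toList ['-']
    if PySem.List.slice send.toList none (some sep_pos) = ['O', 'P', 'E', 'N']
    then acc ++ ['1'] else acc ++ ['0']) []
  if PySem.Chars.find state_str ['1', '1', '1', '1', '1', '1', '1'] = -1 then false else true

-- ===== PORT B =====
-- single pass: state = (found, run); run counts consecutive OPEN sends, found set once run ≥ 7.
def capacity_check_alt_step (st : Bool × Nat) (send : String) : Bool × Nat :=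
  let sep_pos := PySem.Chars.find send.toList ['-']
  if PySem.List.slice send.toList none (some sep_pos) = ['O', 'P', 'E', 'N']
  then
    let run := st.2 + 1
    (st.1 || decide (7 ≤ run), run)
  else (st.1, 0)

def capacity_check_alt (send_list : List String) : Bool :=
  (send_list.foldl capacity_check_alt_step (false, 0)).1

-- ===== PRECONDITION & SPEC =====
-- Pre_ excludes exactly the inputs where Python's send.index('-') raises ValueError
-- (an element without '-'); both A and B raise there.
def Pre_capacity_check (send_list : List String) : Prop :=
  ∀ s ∈ send_list, PySem.Chars.isIn ['-'] s.toList = true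
instance (send_list : List String) : Decidable (Pre_capacity_check send_list) := by
  unfold Pre_capacity_check; infer_instance
def pvWitness_capacity_check : List String := ["OPEN-1", "CLOSE-2"]

def Spec_capacity_check (send_list : List String) (out : Bool) : Prop := out = capacity_check_alt send_list
instance (send_list : List String) (out : Bool) : Decidable (Spec_capacity_check send_list out) := by unfold Spec_capacity_check; infer_instance

-- ===== CLAIM (what is proved, stated in full; the proofs are below) =====
def Claim_equal_capacity_check : Prop := ∀ (send_list : List String), Dom_capacity_check send_list → Pre_capacity_check send_list → Spec_capacity_check send_list (capacity_check send_list)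

-- ===== LEMMAS AND PROOFS =====

-- the per-element test both programs make
def pvOpen (send : String) : Bool :=
  decide (PySem.List.slice send.toList none
      (some (PySem.Chars.find send.toList ['-'])) = ['O', 'P', 'E', 'N'])

-- B's run recursion, extracted
def pvRun : Nat → List Bool → Bool
  | _, [] => false
  | r, true :: bs => decide (7 ≤ r + 1) || pvRun (r + 1) bs
  | _, false :: bs => pvRun 0 bs

lemma pvB_fold (ss : List String) (f : Bool) (r : Nat) :
    (ss.foldl capacity_check_alt_step (f, r)).1 = (f || pvRun r (ss.map pvOpen)) := by
  induction ss generalizing f r with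
  | nil => simp [pvRun]
  | cons s ss ih =>
    by_cases h : PySem.List.slice s.toList none
        (some (PySem.Chars.find s.toList ['-'])) = ['O', 'P', 'E', 'N']
    · rw [List.foldl_cons,
        show capacity_check_alt_step (f, r) s = (f || decide (7 ≤ r + 1), r + 1) by
          simp [capacity_check_alt_step, h], ih]
      simp [pvOpen, h, pvRun, Bool.or_assoc]
    · rw [List.foldl_cons,
        show capacity_check_alt_step (f, r) s = (f, 0) by
          simp [capacity_check_alt_step, h], ih]
      simp [pvOpen, h, pvRun]

lemma pvA_fold (ss : List String) :
    ss.foldl (fun acc send =>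
      let sep_pos := PySem.Chars.find send.toList ['-']
      if PySem.List.slice send.toList none (some sep_pos) = ['O', 'P', 'E', 'N']
      then acc ++ ['1'] else acc ++ ['0']) [] =
    (ss.map pvOpen).map (fun b => if b then '1' else '0') := by
  have : ∀ (ss : List String) (acc : List Char),
      ss.foldl (fun acc send =>
        let sep_pos := PySem.Chars.find send.toList ['-']
        if PySem.List.slice send.toList none (some sep_pos) = ['O', 'P', 'E', 'N']
        then acc ++ ['1'] else acc ++ ['0']) acc =
      acc ++ (ss.map pvOpen).map (fun b => if b then '1' else '0') := by
    intro ss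
    induction ss with
    | nil => simp
    | cons s ss ih =>
      intro acc
      by_cases h : PySem.List.slice s.toList none
          (some (PySem.Chars.find s.toList ['-'])) = ['O', 'P', 'E', 'N'] <;>
        simp [pvOpen, h, ih]
  simpa using this ss []

-- a block of 7 '1's cannot cross a '0': it lies entirely right of it
lemma pvZ (r : Nat) (hr : r < 7) (cs : List Char) :
    List.replicate 7 '1' <:+: List.replicate r '1' ++ '0' :: cs ↔
      List.replicate 7 '1' <:+: cs := by
  constructor
  · rintro ⟨s, t, h⟩
    rw [List.append_assoc] at h
    by_cases hs : s.length ≤ r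
    · exfalso
      have hget := congrArg (fun l => l[r]?) h
      simp only at hget
      have hlt : r - s.length < 7 := by omega
      rw [List.getElem?_append_right hs,
        List.getElem?_append_left (by simpa using hlt),
        List.getElem?_replicate, if_pos hlt] at hget
      rw [List.getElem?_append_right (by simp)] at hget
      simp at hget
    · have hs' : r + 1 ≤ s.length := by omega
      refine ⟨s.drop (r + 1), t, ?_⟩
      have := congrArg (fun l => l.drop (r + 1)) h
      simp only at this
      rw [List.drop_append_of_le_length hs'] at this
      have h2 : (List.replicate r '1' ++ '0' :: cs).drop (r + 1) = cs := by
        have he : List.replicate r '1' ++ '0' :: cs =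
            (List.replicate r '1' ++ ['0']) ++ cs := by simp
        have hlen : (List.replicate r '1' ++ ['0']).length = r + 1 := by simp
        rw [he, ← hlen, List.drop_left]
      rw [h2] at this
      rw [List.append_assoc]
      exact this
  · intro h
    exact h.trans ((List.suffix_cons '0' cs).trans
      (List.suffix_append _ _)).isInfix

lemma pvRun_iff (bs : List Bool) : ∀ (r : Nat), r < 7 →
    (pvRun r bs = true ↔
      List.replicate 7 '1' <:+:
        List.replicate r '1' ++ bs.map (fun b => if b then '1' else '0')) := by
  induction bs with
  | nil =>
    intro r hr
    simp only [pvRun, List.map_nil, List.append_nil]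
    constructor
    · intro h; cases h
    · intro h
      have := h.length_le
      simp at this
      omega
  | cons b bs ih =>
    intro r hr
    have hrw : List.replicate r '1' ++ '1' :: bs.map (fun b => if b then '1' else '0') =
        List.replicate (r + 1) '1' ++ bs.map (fun b => if b then '1' else '0') := by
      rw [List.replicate_succ']; simp
    cases b with
    | true =>
      simp only [pvRun, List.map_cons, ite_true]
      rw [hrw]
      by_cases h7 : 7 ≤ r + 1
      · have hr7 : r + 1 = 7 := by omega
        rw [hr7]
        exact iff_of_true (by simp) ⟨[], _, rfl⟩
      · simp only [h7, decide_false, Bool.false_or]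
        exact ih (r + 1) (by omega)
    | false =>
      simp only [pvRun, List.map_cons, if_neg (Bool.false_ne_true)]
      rw [ih 0 (by omega)]
      simp only [List.replicate_zero, List.nil_append]
      exact (pvZ r hr _).symm

-- ===== VERDICT (by name: the statement is the Claim_ definition above) =====
theorem capacity_check_spec : Claim_equal_capacity_check := by
  intro send_list _ _
  unfold Spec_capacity_check capacity_check capacity_check_alt
  simp only []
  rw [pvA_fold, pvB_fold send_list false 0]
  have hiff := pvRun_iff (send_list.map pvOpen) 0 (by omega)
  simp only [List.replicate_zero, List.nil_append] at hiff
  by_cases h : List.replicate 7 '1' <:+: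
      (send_list.map pvOpen).map (fun b => if b then '1' else '0')
  · have hf : PySem.Chars.find
        ((send_list.map pvOpen).map (fun b => if b then '1' else '0'))
        ['1', '1', '1', '1', '1', '1', '1'] ≠ -1 := by
      rw [PySem.Chars.find_ne_neg_one_iff]
      simpa using h
    rw [if_neg hf]
    simp [hiff.mpr h]
  · have hf : PySem.Chars.find
        ((send_list.map pvOpen).map (fun b => if b then '1' else '0'))
        ['1', '1', '1', '1', '1', '1', '1'] = -1 := by
      rw [PySem.Chars.find_eq_neg_one_iff]
      simpa using h
    rw [if_pos hf]
    have hfalse : pvRun 0 (send_list.map pvOpen) = false := by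
      rw [← Bool.not_eq_true, hiff]; exact h
    simp [hfalse]
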